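-- pv_equiv track=rewrite | github.com/kumar1309/5th-py | 5th.py | getMaxToys
-- ===== SOURCE A (Python) =====
-- def getMaxToys(prices, money):
--     n = len(prices)
--     left = 0
--     current_sum = 0
--     max_toys = 0
--
--
--     for right in range(n):
--         current_sum += prices[right]
--
--
--         while current_sum > money:
--             current_sum -= prices[left]
--             left += 1
--
--         max_toys = max(max_toys, right - left + 1)
--
--     return max_toys
-- ===== SOURCE B (Python) =====
-- def getMaxToys(prices, money):
--     # prefix sums + per-right binary search for the leftmost affordable window start
--     n = len(prices)
--     prefix = [0]
--     for p in prices: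
--         prefix.append(prefix[-1] + p)
--     best = 0
--     for right in range(n):
--         target = prefix[right + 1] - money
--         lo, hi = 0, right + 1
--         while lo < hi:
--             mid = (lo + hi) // 2
--             if prefix[mid] < target:
--                 lo = mid + 1
--             else:
--                 hi = mid
--         best = max(best, right + 1 - lo)
--     return best
-- ===== Notes on version B (the rewrite author's own statement) =====
-- stated objective: alternative
-- what changed: Replaces the amortized two-pointer shrink loop with a prefix-sum table plus a per-element binary search for the leftmost affordable window start.
-- outside the precondition, e.g. on getMaxToys([1], -1): A raises IndexError, B returns 0; on getMaxToys([5, -5, 1], 1): A returns 2, B returns 3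
import Mathlib
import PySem

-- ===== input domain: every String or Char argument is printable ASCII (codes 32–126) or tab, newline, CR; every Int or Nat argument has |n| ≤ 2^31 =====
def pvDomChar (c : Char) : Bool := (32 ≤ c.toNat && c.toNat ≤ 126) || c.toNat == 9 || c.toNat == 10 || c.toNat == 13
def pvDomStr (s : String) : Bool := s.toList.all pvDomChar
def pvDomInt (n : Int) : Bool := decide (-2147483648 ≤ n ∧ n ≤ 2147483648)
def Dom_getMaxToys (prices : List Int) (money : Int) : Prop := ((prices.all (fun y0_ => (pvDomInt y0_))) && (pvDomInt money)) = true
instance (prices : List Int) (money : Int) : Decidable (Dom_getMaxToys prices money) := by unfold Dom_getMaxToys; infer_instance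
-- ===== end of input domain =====

-- B replaces A's two-pointer shrink loop by a prefix-sum table with a per-element binary
-- search (objective: alternative algorithm of similar cost).

-- ===== PORT A =====
-- the inner `while current_sum > money: current_sum -= prices[left]; left += 1` loop;
-- the fuel argument only makes the recursion structural: the caller supplies enough that the
-- 0-branch is never reached before the guards settle.  When `left` runs past the end Python
-- raises IndexError (we return the state; Pre_ excludes those inputs).
def shrinkA (prices : List Int) (money : Int) : Nat → Nat → Int → Nat × Int
  | 0, left, sum => (left, sum)
  | fuel + 1, left, sum =>
    if money < sum then
      if h : left < prices.length then
        shrinkA prices money fuel (left + 1) (sum - prices[left])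
      else (left, sum)  -- Python: IndexError
    else (left, sum)

-- the outer `for right in range(n)` loop carrying (left, current_sum, max_toys); fuel = n - right
def loopA (prices : List Int) (money : Int) : Nat → Nat → Nat → Int → Int → Int
  | 0, _, _, _, mx => mx
  | fuel + 1, right, left, sum, mx =>
    if h : right < prices.length then
      let r := shrinkA prices money (prices.length + 1) left (sum + prices[right])
      loopA prices money fuel (right + 1) r.1 r.2 (max mx ((right : Int) - (r.1 : Int) + 1))
    else mx

def getMaxToys (prices : List Int) (money : Int) : Int :=
  loopA prices money prices.length 0 0 0 0

-- ===== PORT B =====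
-- `prefix = [0]; for p in prices: prefix.append(prefix[-1] + p)`
-- (prefix[-1] is the last element; the list is never empty, so getD's default is dead)
def buildPrefix (acc : List Int) (l : List Int) : List Int :=
  match l with
  | [] => acc
  | p :: rest => buildPrefix (acc ++ [acc.getLast?.getD 0 + p]) rest

-- `while lo < hi: mid = (lo+hi)//2; ...`; indices are nonneg so Nat `/` matches Python `//`,
-- and `prefix[mid]` is always in range in B's runs (getD's default is dead); fuel ≥ hi - lo
def bsearchB (P : List Int) (target : Int) : Nat → Nat → Nat → Nat
  | 0, lo, _ => lo
  | fuel + 1, lo, hi =>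
    if lo < hi then
      let mid := (lo + hi) / 2
      if P.getD mid 0 < target then bsearchB P target fuel (mid + 1) hi
      else bsearchB P target fuel lo mid
    else lo

-- `for right in range(n)` with `best = max(best, right + 1 - lo)`; fuel = n - right
def loopB (prices P : List Int) (money : Int) : Nat → Nat → Int → Int
  | 0, _, best => best
  | fuel + 1, right, best =>
    if right < prices.length then
      let target := P.getD (right + 1) 0 - money
      let lo := bsearchB P target (right + 2) 0 (right + 1)
      loopB prices P money fuel (right + 1) (max best ((right : Int) + 1 - (lo : Int)))
    else best

def getMaxToys_alt (prices : List Int) (money : Int) : Int :=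
  loopB prices (buildPrefix [0] prices) money prices.length 0 0

-- ===== PRECONDITION & SPEC =====
-- prefix sum of the first i prices (used by Pre_'s second disjunct and by the proofs)
def pfx (prices : List Int) (i : Nat) : Int := ((prices.take i).sum)

-- Pre_ admits the task's natural domain — non-negative prices (A's sliding window is
-- meaningless on negatives, e.g. it returns 2 on ([5,-5,1], 1) where the longest affordable
-- window is 3, and can raise IndexError) with money ≥ 0 unless the list is empty (A always
-- raises IndexError on a non-empty list with money < 0) — and, beyond it, any input whose
-- every contiguous window costs at most money (then A's shrink loop never runs and both
-- return the full length, even with negative prices).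
def Pre_getMaxToys (prices : List Int) (money : Int) : Prop :=
  ((∀ p ∈ prices, 0 ≤ p) ∧ (0 ≤ money ∨ prices = [])) ∨
    (∀ j < prices.length + 1, ∀ i < j + 1, pfx prices j - pfx prices i ≤ money)
instance (prices : List Int) (money : Int) : Decidable (Pre_getMaxToys prices money) := by
  unfold Pre_getMaxToys; infer_instance

def pvWitness_getMaxToys : List Int × Int := ([1, 2, 3], 4)

def Spec_getMaxToys (prices : List Int) (money : Int) (out : Int) : Prop := out = getMaxToys_alt prices money
instance (prices : List Int) (money : Int) (out : Int) : Decidable (Spec_getMaxToys prices money out) := by unfold Spec_getMaxToys; infer_instance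

-- ===== CLAIM (what is proved, stated in full; the proofs are below) =====
def Claim_equal_getMaxToys : Prop := ∀ (prices : List Int) (money : Int), Dom_getMaxToys prices money → Pre_getMaxToys prices money → Spec_getMaxToys prices money (getMaxToys prices money)

-- ===== LEMMAS AND PROOFS =====

theorem pfx_succ (prices : List Int) (i : Nat) (h : i < prices.length) :
    pfx prices (i + 1) = pfx prices i + prices[i] := by
  simp [pfx, List.sum_take_succ, h]

theorem pfx_mono (prices : List Int) (hnn : ∀ p ∈ prices, 0 ≤ p)
    {i j : Nat} (hij : i ≤ j) : pfx prices i ≤ pfx prices j := by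
  induction j with
  | zero => simp_all
  | succ j ih =>
    rcases Nat.lt_or_ge i (j + 1) with h | h
    · have h1 : pfx prices i ≤ pfx prices j := ih (by omega)
      by_cases hj : j < prices.length
      · have := hnn prices[j] (by simp)
        rw [pfx_succ prices j hj]; omega
      · have : prices.take (j + 1) = prices.take j := by
          rw [List.take_of_length_le (by omega), List.take_of_length_le (by omega)]
        simp only [pfx, this]; exact h1
    · have : i = j + 1 := by omega
      simp [this]

-- the list B builds, described by a simple recursion
def psums (s : Int) : List Int → List Int
  | [] => []
  | p :: rest => (s + p) :: psums (s + p) rest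

theorem buildPrefix_eq (l : List Int) : ∀ (acc : List Int) (s : Int),
    acc.getLast? = some s → buildPrefix acc l = acc ++ psums s l := by
  induction l with
  | nil => intro acc s _; simp [buildPrefix, psums]
  | cons p rest ih =>
    intro acc s hs
    have := ih (acc ++ [s + p]) (s + p) (by simp)
    simp only [buildPrefix, hs, Option.getD_some, psums, this, List.append_assoc,
      List.singleton_append]

theorem psums_getElem? (l : List Int) : ∀ (s : Int) (i : Nat), i < l.length →
    (psums s l)[i]? = some (s + (l.take (i + 1)).sum) := by
  induction l with
  | nil => intro s i h; simp at h
  | cons p rest ih =>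
    intro s i h
    cases i with
    | zero => simp [psums]
    | succ i =>
      have := ih (s + p) i (by simpa using Nat.lt_of_succ_lt_succ h)
      simp [psums, this, add_assoc]

theorem prefix_getD (prices : List Int) (i : Nat) (h : i ≤ prices.length) :
    (buildPrefix [0] prices).getD i 0 = pfx prices i := by
  have hb : buildPrefix [0] prices = 0 :: psums 0 prices := by
    simpa using buildPrefix_eq prices [0] 0 rfl
  cases i with
  | zero => simp [hb, pfx]
  | succ i =>
    have := psums_getElem? prices 0 i (by omega)
    simp [hb, List.getD, this, pfx]

-- binary-search characterisation: result m is the least index with target ≤ pfx m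
theorem bsearchB_spec (prices : List Int) (hnn : ∀ p ∈ prices, 0 ≤ p) (target : Int) :
    ∀ (fuel lo hi : Nat), hi - lo < fuel → lo ≤ hi → hi ≤ prices.length →
    (∀ l < lo, pfx prices l < target) → target ≤ pfx prices hi →
    lo ≤ bsearchB (buildPrefix [0] prices) target fuel lo hi ∧
    bsearchB (buildPrefix [0] prices) target fuel lo hi ≤ hi ∧
    (∀ l < bsearchB (buildPrefix [0] prices) target fuel lo hi, pfx prices l < target) ∧
    target ≤ pfx prices (bsearchB (buildPrefix [0] prices) target fuel lo hi) := by
  intro fuel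
  induction fuel with
  | zero => intro lo hi h; omega
  | succ fuel ih =>
    intro lo hi hfuel hle hhin hlo hhi
    rw [bsearchB]
    by_cases hlt : lo < hi
    · simp only [hlt, if_true]
      have hmid1 : lo ≤ (lo + hi) / 2 := by omega
      have hmid2 : (lo + hi) / 2 < hi := by omega
      rw [prefix_getD prices ((lo + hi) / 2) (by omega)]
      by_cases hc : pfx prices ((lo + hi) / 2) < target
      · simp only [hc, if_true]
        have := ih ((lo + hi) / 2 + 1) hi (by omega) (by omega) hhin
          (fun l hl => by
            rcases Nat.lt_or_ge l lo with h' | h'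
            · exact hlo l h'
            · exact lt_of_le_of_lt (pfx_mono prices hnn (by omega)) hc)
          hhi
        exact ⟨by omega, this.2.1, this.2.2.1, this.2.2.2⟩
      · simp only [hc, if_false]
        have := ih lo ((lo + hi) / 2) (by omega) (by omega) (by omega) hlo (by omega)
        exact ⟨this.1, by omega, this.2.2.1, this.2.2.2⟩
    · simp only [hlt, if_false]
      have : lo = hi := by omega
      subst this
      exact ⟨le_refl _, le_refl _, hlo, hhi⟩

-- shrink characterisation: from (left, pfx t - pfx left) it reaches the least L ≥ left
-- with pfx t - pfx L ≤ money
theorem shrinkA_spec (prices : List Int) (money : Int) (hm : 0 ≤ money) : ∀ (fuel left t : Nat), t - left < fuel → left ≤ t →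
    t ≤ prices.length →
    ∃ L, shrinkA prices money fuel left (pfx prices t - pfx prices left) =
        (L, pfx prices t - pfx prices L) ∧
      left ≤ L ∧ L ≤ t ∧ pfx prices t - pfx prices L ≤ money ∧
      (∀ l, left ≤ l → l < L → money < pfx prices t - pfx prices l) := by
  intro fuel
  induction fuel with
  | zero => intro left t h; omega
  | succ fuel ih =>
    intro left t hfuel hle hlen
    rw [shrinkA]
    by_cases hc : money < pfx prices t - pfx prices left
    · have hne : left ≠ t := by
        intro h; subst h; simp at hc; omega
      have hlt : left < prices.length := by omega
      simp only [hc, if_true, hlt, dif_pos]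
      have hstep : pfx prices t - pfx prices left - prices[left] =
          pfx prices t - pfx prices (left + 1) := by
        rw [pfx_succ prices left hlt]; ring
      rw [hstep]
      obtain ⟨L, hEq, hL1, hL2, hL3, hL4⟩ := ih (left + 1) t (by omega) (by omega) hlen
      refine ⟨L, hEq, by omega, hL2, hL3, fun l hl1 hl2 => ?_⟩
      rcases Nat.lt_or_ge l (left + 1) with h' | h'
      · have : l = left := by omega
        subst this; exact hc
      · exact hL4 l h' hl2
    · simp only [hc, if_false]
      exact ⟨left, rfl, le_refl _, hle, by omega,
        fun l h1 h2 => absurd (lt_of_le_of_lt h1 h2) (lt_irrefl _)⟩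

-- the two outer loops agree, given the two-pointer invariant
theorem loop_eq (prices : List Int) (money : Int) (hnn : ∀ p ∈ prices, 0 ≤ p)
    (hm : 0 ≤ money) : ∀ (fuel r left : Nat), prices.length - r ≤ fuel →
    left ≤ r → (∀ l < left, money < pfx prices r - pfx prices l) → ∀ mx,
    loopA prices money fuel r left (pfx prices r - pfx prices left) mx =
    loopB prices (buildPrefix [0] prices) money fuel r mx := by
  intro fuel
  induction fuel with
  | zero =>
    intro r left hfuel hlr hinv mx
    simp [loopA, loopB]
  | succ fuel ih =>
    intro r left hfuel hlr hinv mx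
    rw [loopA, loopB]
    by_cases hlt : r < prices.length
    · simp only [hlt, dif_pos, if_true]
      have hsum : pfx prices r - pfx prices left + prices[r] =
          pfx prices (r + 1) - pfx prices left := by
        rw [pfx_succ prices r hlt]; ring
      rw [hsum]
      obtain ⟨L, hEq, hL1, hL2, hL3, hL4⟩ := shrinkA_spec prices money hm
        (prices.length + 1) left (r + 1) (by omega) (by omega) (by omega)
      rw [hEq]
      rw [prefix_getD prices (r + 1) (by omega)]
      have hbs := bsearchB_spec prices hnn (pfx prices (r + 1) - money) (r + 2) 0 (r + 1)
        (by omega) (by omega) (by omega) (fun l hl => absurd hl (Nat.not_lt_zero l)) (by omega)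
      set m := bsearchB (buildPrefix [0] prices) (pfx prices (r + 1) - money) (r + 2) 0 (r + 1)
        with hmdef
      obtain ⟨_, hm2, hm3, hm4⟩ := hbs
      have hallL : ∀ l < L, money < pfx prices (r + 1) - pfx prices l := by
        intro l hl
        rcases Nat.lt_or_ge l left with h' | h'
        · have h1 := hinv l h'
          have h2 : pfx prices r ≤ pfx prices (r + 1) :=
            pfx_mono prices hnn (by omega)
          omega
        · exact hL4 l h' hl
      have hLm : L = m := by
        rcases Nat.lt_trichotomy L m with h | h | h
        · have := hm3 L h; omega
        · exact h
        · have := hallL m h; omega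
      have harith : (r : Int) - (L : Int) + 1 = (r : Int) + 1 - (m : Int) := by
        rw [hLm]; ring
      rw [harith, hLm]
      exact ih (r + 1) m (by omega) (by omega) (fun l hl => hallL l (by omega)) _
    · simp [hlt]

-- when every probed prefix is ≥ target the binary search never moves lo
theorem bsearchB_all (prices : List Int) (target : Int) :
    ∀ (fuel lo hi : Nat), hi - lo < fuel → hi ≤ prices.length →
    (∀ idx ≤ hi, target ≤ pfx prices idx) →
    bsearchB (buildPrefix [0] prices) target fuel lo hi = lo := by
  intro fuel
  induction fuel with
  | zero => intro lo hi h; omega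
  | succ fuel ih =>
    intro lo hi hfuel hhin hall
    rw [bsearchB]
    by_cases hlt : lo < hi
    · simp only [hlt, if_true]
      rw [prefix_getD prices ((lo + hi) / 2) (by omega)]
      have := hall ((lo + hi) / 2) (by omega)
      rw [if_neg (by omega)]
      exact ih lo ((lo + hi) / 2) (by omega) (by omega) fun idx h => hall idx (by omega)
    · simp [hlt]

-- when every contiguous window is affordable neither loop ever moves its left bound
theorem loop_eq_allAfford (prices : List Int) (money : Int)
    (hW : ∀ j ≤ prices.length, ∀ i ≤ j, pfx prices j - pfx prices i ≤ money) :
    ∀ (fuel r : Nat), prices.length - r ≤ fuel → ∀ mx,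
    loopA prices money fuel r 0 (pfx prices r) mx =
    loopB prices (buildPrefix [0] prices) money fuel r mx := by
  intro fuel
  induction fuel with
  | zero => intro r hfuel mx; simp [loopA, loopB]
  | succ fuel ih =>
    intro r hfuel mx
    rw [loopA, loopB]
    by_cases hlt : r < prices.length
    · simp only [hlt, dif_pos, if_true]
      have hsum : pfx prices r + prices[r] = pfx prices (r + 1) :=
        (pfx_succ prices r hlt).symm
      rw [hsum]
      have h0 : pfx prices (r + 1) - pfx prices 0 ≤ money := hW (r + 1) (by omega) 0 (by omega)
      have hshr : shrinkA prices money (prices.length + 1) 0 (pfx prices (r + 1)) =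
          (0, pfx prices (r + 1)) := by
        rw [shrinkA]
        rw [if_neg (by simp [pfx] at h0 ⊢; omega)]
      rw [hshr]
      rw [prefix_getD prices (r + 1) (by omega)]
      rw [bsearchB_all prices (pfx prices (r + 1) - money) (r + 2) 0 (r + 1) (by omega)
        (by omega) (fun idx hidx => by have := hW (r + 1) (by omega) idx (by omega); omega)]
      have harith : (r : Int) - ((0 : Nat) : Int) + 1 = (r : Int) + 1 - ((0 : Nat) : Int) := by
        simp
      rw [harith]
      exact ih (r + 1) (by omega) _
    · simp [hlt]

-- ===== VERDICT (by name: the statement is the Claim_ definition above) =====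
theorem getMaxToys_spec : Claim_equal_getMaxToys := by
  intro prices money _ hpre
  unfold Spec_getMaxToys getMaxToys getMaxToys_alt
  rcases hpre with ⟨hnn, hmoney⟩ | hW
  · rcases hmoney with hm | hnil
    · have h0 : (0 : Int) = pfx prices 0 - pfx prices 0 := by simp
      rw [h0]
      exact loop_eq prices money hnn hm prices.length 0 0 (by omega) (by omega)
        (fun l hl => absurd hl (Nat.not_lt_zero l)) 0
    · subst hnil
      simp [loopA, loopB, buildPrefix]
  · have h0 : (0 : Int) = pfx prices 0 := by simp [pfx]
    rw [h0]
    exact loop_eq_allAfford prices money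
      (fun j hj i hi => hW j (by omega) i (by omega)) prices.length 0 (by omega) 0
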